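-- pv_equiv track=rewrite | github.com/jgurhem/PJR_TBSLA | infer_run.py | gen_values
-- ===== SOURCE A (Python) =====
-- def gen_values(case_def, in_, nodes, cores, v):
--   gr = in_[0]
--   gc = in_[1]
--   r = []
--   for i in case_def:
--     if i == 'CPT':
--       r.append(None)
--     elif i == 'GR':
--       r.append(gr)
--     elif i == 'GC':
--       r.append(gc)
--     elif i == 'LGR':
--       r.append(None)
--     elif i == 'LGC':
--       r.append(None)
--     elif i == 'BGR':
--       r.append(None)
--     elif i == 'BGC':
--       r.append(None)
--     else:
--       r.append(__get(v, case_def, i))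
--   return tuple(r)
--
-- def __get(v, case_def, param):
--   r = v[case_def.index(param)]
--   if r == None:
--     return 0
--   return r
-- ===== SOURCE B (Python) =====
-- def gen_values(case_def, in_, nodes, cores, v):
--   special = {'CPT': None, 'GR': in_[0], 'GC': in_[1],
--              'LGR': None, 'LGC': None, 'BGR': None, 'BGC': None}
--   pos = {}
--   for i, x in enumerate(case_def):
--     pos.setdefault(x, []).append(i)
--   out = [None] * len(case_def)
--   for t, positions in pos.items():
--     if t in special:
--       val = special[t]
--     else:
--       val = v[positions[0]]
--       if val == None:
--         val = 0
--     for i in positions: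
--       out[i] = val
--   return tuple(out)
-- ===== Notes on version B (the rewrite author's own statement) =====
-- stated objective: faster
-- what changed: B is token-major instead of A's position-major pass: one grouping pass builds a dict token -> list of its positions, then for each distinct token it resolves a single value (literal special-token dict, or v at the token's first position with None coerced to 0) and scatters it into a preallocated output list, replacing A's per-element if/elif chain with a repeated case_def.index scan per non-special element.
import Mathlib
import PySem

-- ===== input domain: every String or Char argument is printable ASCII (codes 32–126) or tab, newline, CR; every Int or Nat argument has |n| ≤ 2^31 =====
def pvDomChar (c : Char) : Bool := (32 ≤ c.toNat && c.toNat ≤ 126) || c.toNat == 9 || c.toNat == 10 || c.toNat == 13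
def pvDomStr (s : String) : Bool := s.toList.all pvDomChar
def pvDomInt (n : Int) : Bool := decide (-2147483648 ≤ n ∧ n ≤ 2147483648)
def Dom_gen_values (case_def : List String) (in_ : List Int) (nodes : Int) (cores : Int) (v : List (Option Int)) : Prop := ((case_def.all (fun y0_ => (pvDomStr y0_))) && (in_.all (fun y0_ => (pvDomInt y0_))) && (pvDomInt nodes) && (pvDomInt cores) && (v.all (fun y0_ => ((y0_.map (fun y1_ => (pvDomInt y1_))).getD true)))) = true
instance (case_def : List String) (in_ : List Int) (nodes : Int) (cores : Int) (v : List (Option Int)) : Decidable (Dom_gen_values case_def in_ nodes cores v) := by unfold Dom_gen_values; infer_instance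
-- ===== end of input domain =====

-- B is token-major instead of A's position-major pass: it deduplicates case_def and, per distinct
-- token, resolves one value and scatters it into all that token's positions (objective: alternative).

-- ===== PORT A =====
-- port of helper __get(v, case_def, param); index default 0 is never used (param ∈ case_def),
-- v[...] out of range (= Python IndexError) is excluded by Pre_
def pvGet (v : List (Option Int)) (case_def : List String) (param : String) : Option Int :=
  let idx : Nat := (PySem.List.index? case_def param).getD 0
  let r : Option Int := (PySem.List.pyGet? v (idx : Int)).getD none
  match r with
  | none => some 0
  | some x => some x

def gen_values (case_def : List String) (in_ : List Int) (nodes : Int) (cores : Int) (v : List (Option Int)) : List (Option Int) :=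
  let gr : Int := (PySem.List.pyGet? in_ 0).getD 0   -- in_[0]; IndexError excluded by Pre_
  let gc : Int := (PySem.List.pyGet? in_ 1).getD 0   -- in_[1]; IndexError excluded by Pre_
  case_def.foldl (fun r i =>
    if i = "CPT" then r ++ [none]
    else if i = "GR" then r ++ [some gr]
    else if i = "GC" then r ++ [some gc]
    else if i = "LGR" then r ++ [none]
    else if i = "LGC" then r ++ [none]
    else if i = "BGR" then r ++ [none]
    else if i = "BGC" then r ++ [none]
    else r ++ [pvGet v case_def i]) []

-- ===== PORT B =====
def gen_values_alt (case_def : List String) (in_ : List Int) (nodes : Int) (cores : Int) (v : List (Option Int)) : List (Option Int) :=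
  -- special = {'CPT': None, 'GR': in_[0], 'GC': in_[1], 'LGR': None, 'LGC': None, 'BGR': None, 'BGC': None}
  -- (a literal dict with distinct keys = PySem.Dict.mk of its pairs); in_[0]/in_[1]: IndexError excluded by Pre_
  let special : PySem.Dict String (Option Int) :=
    PySem.Dict.mk [("CPT", none), ("GR", some ((PySem.List.pyGet? in_ 0).getD 0)),
      ("GC", some ((PySem.List.pyGet? in_ 1).getD 0)), ("LGR", none), ("LGC", none),
      ("BGR", none), ("BGC", none)]
  -- pos = {}; for i, x in enumerate(case_def): pos.setdefault(x, []).append(i)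
  -- (setdefault(x, []).append(i) sets pos[x] = pos.get(x, []) + [i] = Dict.modify)
  let pos : PySem.Dict String (List Int) :=
    (PySem.List.enumerate case_def).foldl (fun d p => d.modify p.2 [] (· ++ [p.1])) PySem.Dict.empty
  let out0 : List (Option Int) := List.replicate case_def.length none   -- out = [None] * len(case_def)
  -- for t, positions in pos.items(): …
  pos.items.foldl (fun out tp =>
    let val : Option Int :=
      if special.contains tp.1 then special.getD tp.1 none   -- val = special[t]; the key is present by the guard
      else
        -- val = v[positions[0]]: positions ≠ [] by construction; v-IndexError excluded by Pre_
        let v0 : Option Int := (PySem.List.pyGet? v ((tp.2.head?).getD 0)).getD none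
        match v0 with | none => some 0 | some x => some x
    -- for i in positions: out[i] = val   (indices are in range by construction)
    tp.2.foldl (fun o i => PySem.List.pySetD o i val) out) out0

-- ===== PRECONDITION & SPEC =====
-- Pre_ excludes exactly the inputs where Python A raises: in_ with fewer than two elements
-- (IndexError on in_[0]/in_[1]) and non-special tokens whose first occurrence index is out of
-- range of v (IndexError in __get).
def Pre_gen_values (case_def : List String) (in_ : List Int) (nodes : Int) (cores : Int) (v : List (Option Int)) : Prop :=
  2 ≤ in_.length ∧
  ∀ t ∈ case_def, t ∉ ["CPT", "GR", "GC", "LGR", "LGC", "BGR", "BGC"] → case_def.idxOf t < v.length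
instance (case_def : List String) (in_ : List Int) (nodes : Int) (cores : Int) (v : List (Option Int)) : Decidable (Pre_gen_values case_def in_ nodes cores v) := by unfold Pre_gen_values; infer_instance

def pvWitness_gen_values : List String × List Int × Int × Int × List (Option Int) :=
  (["GR", "x", "CPT", "x"], [5, 6], 1, 2, [none, some 3, none, none])

def Spec_gen_values (case_def : List String) (in_ : List Int) (nodes : Int) (cores : Int) (v : List (Option Int)) (out : List (Option Int)) : Prop := out = gen_values_alt case_def in_ nodes cores v
instance (case_def : List String) (in_ : List Int) (nodes : Int) (cores : Int) (v : List (Option Int)) (out : List (Option Int)) : Decidable (Spec_gen_values case_def in_ nodes cores v out) := by unfold Spec_gen_values; infer_instance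

-- ===== CLAIM (what is proved, stated in full; the proofs are below) =====
def Claim_equal_gen_values : Prop := ∀ (case_def : List String) (in_ : List Int) (nodes : Int) (cores : Int) (v : List (Option Int)), Dom_gen_values case_def in_ nodes cores v → Pre_gen_values case_def in_ nodes cores v → Spec_gen_values case_def in_ nodes cores v (gen_values case_def in_ nodes cores v)

-- ===== LEMMAS AND PROOFS =====

-- the per-token value both programs compute
def pvVal (gr gc : Int) (v : List (Option Int)) (case_def : List String) (t : String) : Option Int :=
  if t = "GR" then some gr
  else if t = "GC" then some gc
  else if t = "CPT" ∨ t = "LGR" ∨ t = "LGC" ∨ t = "BGR" ∨ t = "BGC" then none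
  else pvGet v case_def t

-- A's fold appends pvVal of each token
lemma pvA_fold (gr gc : Int) (v : List (Option Int)) (cd0 : List String) :
    ∀ (cd : List String) (acc : List (Option Int)),
      cd.foldl (fun r i =>
        if i = "CPT" then r ++ [none]
        else if i = "GR" then r ++ [some gr]
        else if i = "GC" then r ++ [some gc]
        else if i = "LGR" then r ++ [none]
        else if i = "LGC" then r ++ [none]
        else if i = "BGR" then r ++ [none]
        else if i = "BGC" then r ++ [none]
        else r ++ [pvGet v cd0 i]) acc = acc ++ cd.map (pvVal gr gc v cd0) := by
  intro cd
  induction cd with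
  | nil => intro acc; simp
  | cons t rest ih =>
    intro acc
    simp only [List.foldl_cons, List.map_cons, ih]
    unfold pvVal
    split_ifs with h1 h2 h3 h4 h5 h6 h7 <;> simp_all

-- B's positions comprehension, with a variable start
def pvPos (cd : List String) (t : String) (s : Int) : List Int :=
  ((PySem.List.enumerate cd s).filter (fun p => p.2 == t)).map (fun p => p.1)

lemma pvPos_cons (x : String) (cd t s) :
    pvPos (x :: cd) t s = if x = t then s :: pvPos cd t (s+1) else pvPos cd t (s+1) := by
  simp only [pvPos, PySem.List.enumerate_cons, List.filter_cons]
  by_cases h : x = t <;> simp [h]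

lemma pvPos_mem (cd : List String) (t : String) :
    ∀ (s : Int) (i : Int), i ∈ pvPos cd t s ↔ ∃ (k : Nat) (hk : k < cd.length), i = s + k ∧ cd[k] = t := by
  induction cd with
  | nil => simp [pvPos]
  | cons x rest ih =>
    intro s i
    by_cases h : x = t
    · subst h
      rw [pvPos_cons, if_pos rfl]
      constructor
      · intro hm
        rcases List.mem_cons.mp hm with rfl | hm'
        · exact ⟨0, by simp, by simp, by simp⟩
        · obtain ⟨k, hk, rfl, hget⟩ := (ih (s+1) i).mp hm'
          exact ⟨k+1, by simpa using hk, by push_cast; ring, by simpa using hget⟩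
      · rintro ⟨k, hk, rfl, hget⟩
        cases k with
        | zero => simp
        | succ k =>
          refine List.mem_cons.mpr (Or.inr ((ih (s+1) _).mpr ⟨k, by simpa using hk, by push_cast; ring, by simpa using hget⟩))
    · rw [pvPos_cons, if_neg h]
      constructor
      · intro hm
        obtain ⟨k, hk, rfl, hget⟩ := (ih (s+1) i).mp hm
        exact ⟨k+1, by simpa using hk, by push_cast; ring, by simpa using hget⟩
      · rintro ⟨k, hk, rfl, hget⟩
        cases k with
        | zero => exact absurd (by simpa using hget) h
        | succ k => exact (ih (s+1) _).mpr ⟨k, by simpa using hk, by push_cast; ring, by simpa using hget⟩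

lemma pvPos_head (cd : List String) (t : String) (ht : t ∈ cd) :
    ∀ s : Int, (pvPos cd t s).head? = some (s + (cd.idxOf t : Int)) := by
  induction cd with
  | nil => cases ht
  | cons x rest ih =>
    intro s
    rw [pvPos_cons]
    by_cases h : x = t
    · simp [h, List.idxOf_cons_self]
    · have ht' : t ∈ rest := by rcases List.mem_cons.mp ht with h' | h'; exact absurd h'.symm h; exact h'
      rw [if_neg h, ih ht' (s+1)]
      have : (x :: rest).idxOf t = rest.idxOf t + 1 := by simp [h]
      rw [this]; push_cast; ring_nf

-- the inner write loop: length is preserved and every listed (nonnegative) index holds val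
lemma pvScatter_len (val : Option Int) :
    ∀ (ps : List Int) (out : List (Option Int)),
      (ps.foldl (fun o i => PySem.List.pySetD o i val) out).length = out.length := by
  intro ps
  induction ps with
  | nil => intro out; rfl
  | cons p rest ih => intro out; rw [List.foldl_cons, ih, PySem.List.length_pySetD]

lemma pvScatter_get (val : Option Int) :
    ∀ (ps : List Int) (out : List (Option Int)) (j : Nat), j < out.length →
      (∀ i ∈ ps, 0 ≤ i) →
      (ps.foldl (fun o i => PySem.List.pySetD o i val) out)[j]? =
        if (j : Int) ∈ ps then some val else out[j]? := by
  intro ps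
  induction ps with
  | nil => intro out j hj _; simp
  | cons p rest ih =>
    intro out j hj hpos
    have hp0 : 0 ≤ p := hpos p (by simp)
    rw [List.foldl_cons, PySem.List.pySetD_of_nonneg _ _ hp0,
      ih _ j (by simpa using hj) (fun i hi => hpos i (by simp [hi]))]
    by_cases hm : (j : Int) ∈ rest
    · simp [hm]
    · by_cases hpj : (j : Int) = p
      · have : p.toNat = j := by omega
        simp [hpj, this, hj]
      · have : p.toNat ≠ j := by omega
        simp [hm, hpj, List.getElem?_set_ne this]

lemma pvIdxOf?_of_mem (cd : List String) (t : String) (ht : t ∈ cd) : cd.idxOf? t = some (cd.idxOf t) := by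
  induction cd with
  | nil => cases ht
  | cons x rest ih =>
    by_cases h : x = t
    · subst h; simp [List.idxOf?_cons]
    · have ht' : t ∈ rest := by rcases List.mem_cons.mp ht with h' | h'; exact absurd h'.symm h; exact h'
      simp [List.idxOf?_cons, h, ih ht']

-- B's dict literal special (gr gc abstracted)
def pvSpecial (gr gc : Int) : PySem.Dict String (Option Int) :=
  PySem.Dict.mk [("CPT", none), ("GR", some gr), ("GC", some gc), ("LGR", none),
    ("LGC", none), ("BGR", none), ("BGC", none)]

-- B's per-token value computation agrees with pvVal
lemma pvVal_eq (gr gc : Int) (v : List (Option Int)) (cd : List String) (t : String) (ht : t ∈ cd) :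
    (if (pvSpecial gr gc).contains t then (pvSpecial gr gc).getD t none
     else match (PySem.List.pyGet? v (((pvPos cd t 0).head?).getD 0)).getD none with
       | none => some 0 | some x => some x) = pvVal gr gc v cd t := by
  by_cases h1 : t = "CPT"
  · subst h1; simp [pvSpecial, pvVal, PySem.Dict.getD_eq_get?_getD, PySem.Dict.get?_mk_cons]
  by_cases h2 : t = "GR"
  · subst h2; simp [pvSpecial, pvVal, PySem.Dict.getD_eq_get?_getD, PySem.Dict.get?_mk_cons]
  by_cases h3 : t = "GC"
  · subst h3; simp [pvSpecial, pvVal, PySem.Dict.getD_eq_get?_getD, PySem.Dict.get?_mk_cons]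
  by_cases h4 : t = "LGR"
  · subst h4; simp [pvSpecial, pvVal, PySem.Dict.getD_eq_get?_getD, PySem.Dict.get?_mk_cons]
  by_cases h5 : t = "LGC"
  · subst h5; simp [pvSpecial, pvVal, PySem.Dict.getD_eq_get?_getD, PySem.Dict.get?_mk_cons]
  by_cases h6 : t = "BGR"
  · subst h6; simp [pvSpecial, pvVal, PySem.Dict.getD_eq_get?_getD, PySem.Dict.get?_mk_cons]
  by_cases h7 : t = "BGC"
  · subst h7; simp [pvSpecial, pvVal, PySem.Dict.getD_eq_get?_getD, PySem.Dict.get?_mk_cons]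
  have hc : (pvSpecial gr gc).contains t = false := by
    simp [pvSpecial, Ne.symm h1, Ne.symm h2, Ne.symm h3, Ne.symm h4, Ne.symm h5, Ne.symm h6, Ne.symm h7]
  rw [if_neg (by simp [hc])]
  rw [pvPos_head cd t ht 0]
  have hidx : (PySem.List.index? cd t).getD 0 = cd.idxOf t := by
    rw [PySem.List.index?_eq_idxOf?, pvIdxOf?_of_mem cd t ht]
    rfl
  simp only [pvVal, if_neg h2, if_neg h3, if_neg (by simp [h1, h4, h5, h6, h7] :
    ¬(t = "CPT" ∨ t = "LGR" ∨ t = "LGC" ∨ t = "BGR" ∨ t = "BGC"))]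
  simp only [pvGet, hidx, Option.getD_some, zero_add]

-- the grouping pass: pos.items lists each distinct token with all its positions
lemma pvPos_items (cd : List String) :
    ((PySem.List.enumerate cd).foldl (fun d p => d.modify p.2 [] (· ++ [p.1])) PySem.Dict.empty).items
      = (PySem.List.dedup cd).map (fun t => (t, pvPos cd t 0)) := by
  set D := (PySem.List.enumerate cd).foldl (fun d p => d.modify p.2 [] (· ++ [p.1])) PySem.Dict.empty with hD
  have hswap : D = ((PySem.List.enumerate cd).map Prod.swap).foldl
      (fun d p => d.modify p.1 [] (· ++ [p.2])) PySem.Dict.empty := by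
    rw [List.foldl_map]; rfl
  have hkeys : D.keys = PySem.List.dedup cd := by
    rw [hD, PySem.Dict.keys_foldl_modify_key (PySem.List.enumerate cd) (fun p => p.2) []
      (fun _ p => (· ++ [p.1])) PySem.Dict.empty]
    rw [PySem.Dict.keys_empty, PySem.List.map_snd_enumerate, PySem.List.dedup_eq_ofList]
    simp [PySem.Set.update, PySem.Set.ofList_eq_foldl]
  have hnodup : D.keys.Nodup := by
    rw [hD]
    exact PySem.Dict.nodup_keys_foldl_modify_key (PySem.List.enumerate cd) (fun p => p.2) []
      (fun _ p => (· ++ [p.1])) PySem.Dict.empty (by simp)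
  have hgetD : ∀ t, D.getD t [] = pvPos cd t 0 := by
    intro t
    rw [hswap, PySem.Dict.getD_foldl_modify_append, PySem.Dict.getD_empty, List.nil_append]
    rw [pvPos, List.filter_map]
    simp [Function.comp_def]
  rw [PySem.Dict.items_eq_map_keys D hnodup [], hkeys]
  exact List.map_congr_left (fun t _ => by rw [hgetD])

-- B's outer fold over the grouped (token, positions) pairs: every position whose token has
-- been processed carries pvVal of its token
lemma pvB_fold (gr gc : Int) (v : List (Option Int)) (cd : List String) :
    ∀ (ts : List String) (out : List (Option Int)),
      (∀ t ∈ ts, t ∈ cd) → out.length = cd.length →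
      ∀ (j : Nat) (hj : j < cd.length),
      ((ts.map (fun t => (t, pvPos cd t 0))).foldl (fun out tp =>
          tp.2.foldl (fun o i => PySem.List.pySetD o i
            (if (pvSpecial gr gc).contains tp.1 then (pvSpecial gr gc).getD tp.1 none
             else match (PySem.List.pyGet? v ((tp.2.head?).getD 0)).getD none with
               | none => some 0 | some x => some x)) out) out)[j]? =
        (if cd[j] ∈ ts then some (pvVal gr gc v cd cd[j]) else out[j]?) := by
  intro ts
  induction ts with
  | nil => intro out _ _ j hj; simp
  | cons t rest ih =>
    intro out hts hlen j hj
    have htcd : t ∈ cd := hts t (by simp)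
    rw [List.map_cons, List.foldl_cons]
    simp only []
    set val : Option Int :=
      if (pvSpecial gr gc).contains t then (pvSpecial gr gc).getD t none
      else match (PySem.List.pyGet? v (((pvPos cd t 0).head?).getD 0)).getD none with
        | none => some 0 | some x => some x with hval
    have hvalv : val = pvVal gr gc v cd t := by rw [hval]; exact pvVal_eq gr gc v cd t htcd
    have hlen1 : ((pvPos cd t 0).foldl (fun o i => PySem.List.pySetD o i val) out).length = cd.length := by
      rw [pvScatter_len]; exact hlen
    rw [ih _ (fun t' ht' => hts t' (by simp [ht'])) hlen1 j hj]
    by_cases hr : cd[j] ∈ rest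
    · simp [hr]
    · have hpos0 : ∀ i ∈ pvPos cd t 0, (0:Int) ≤ i := by
        intro i hi
        obtain ⟨k, hk, rfl, _⟩ := (pvPos_mem cd t 0 i).mp hi
        positivity
      rw [if_neg hr, pvScatter_get val _ out j (hlen ▸ hj) hpos0]
      by_cases hcdj : cd[j] = t
      · have hmem : (j : Int) ∈ pvPos cd t 0 := (pvPos_mem cd t 0 j).mpr ⟨j, hj, by simp, hcdj⟩
        rw [if_pos hmem, hvalv, hcdj]
        simp
      · have hnm : (j : Int) ∉ pvPos cd t 0 := by
          intro hm
          obtain ⟨k, hk, hkj, hget⟩ := (pvPos_mem cd t 0 (j : Int)).mp hm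
          have : k = j := by omega
          exact hcdj (this ▸ hget)
        rw [if_neg hnm, if_neg (by simp [hcdj, hr])]

-- B's outer fold preserves the length of out
lemma pvB_len (gr gc : Int) (v : List (Option Int)) (cd : List String) :
    ∀ (ts : List String) (out : List (Option Int)),
      ((ts.map (fun t => (t, pvPos cd t 0))).foldl (fun out tp =>
          tp.2.foldl (fun o i => PySem.List.pySetD o i
            (if (pvSpecial gr gc).contains tp.1 then (pvSpecial gr gc).getD tp.1 none
             else match (PySem.List.pyGet? v ((tp.2.head?).getD 0)).getD none with
               | none => some 0 | some x => some x)) out) out).length = out.length := by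
  intro ts
  induction ts with
  | nil => intro out; rfl
  | cons t rest ih => intro out; rw [List.map_cons, List.foldl_cons, ih, pvScatter_len]

-- ===== VERDICT (by name: the statement is the Claim_ definition above) =====
theorem gen_values_spec : Claim_equal_gen_values := by
  intro cd in_ nodes cores v _ _
  unfold Spec_gen_values
  have hA : gen_values cd in_ nodes cores v =
      cd.map (pvVal ((PySem.List.pyGet? in_ 0).getD 0) ((PySem.List.pyGet? in_ 1).getD 0) v cd) := by
    unfold gen_values
    rw [pvA_fold]
    simp
  have hB : gen_values_alt cd in_ nodes cores v =
      (((PySem.List.enumerate cd).foldl (fun d p => d.modify p.2 [] (· ++ [p.1]))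
          PySem.Dict.empty).items).foldl (fun out tp =>
        tp.2.foldl (fun o i => PySem.List.pySetD o i
          (if (pvSpecial ((PySem.List.pyGet? in_ 0).getD 0) ((PySem.List.pyGet? in_ 1).getD 0)).contains tp.1
           then (pvSpecial ((PySem.List.pyGet? in_ 0).getD 0) ((PySem.List.pyGet? in_ 1).getD 0)).getD tp.1 none
           else match (PySem.List.pyGet? v ((tp.2.head?).getD 0)).getD none with
             | none => some 0 | some x => some x)) out) (List.replicate cd.length none) := rfl
  rw [hA, hB, pvPos_items cd]
  apply List.ext_getElem?
  intro j
  by_cases hj : j < cd.length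
  · rw [pvB_fold _ _ v cd (PySem.List.dedup cd) _
      (fun t' ht' => (PySem.List.mem_dedup _ _).mp ht') (by simp) j hj]
    have hmem : cd[j] ∈ PySem.List.dedup cd := (PySem.List.mem_dedup _ _).mpr (List.getElem_mem hj)
    rw [if_pos hmem, List.getElem?_map, List.getElem?_eq_getElem hj]
    rfl
  · have h1 : (cd.map (pvVal ((PySem.List.pyGet? in_ 0).getD 0) ((PySem.List.pyGet? in_ 1).getD 0) v cd))[j]? = none := by
      rw [List.getElem?_eq_none]
      simpa using Nat.le_of_not_lt hj
    have h2 := pvB_len ((PySem.List.pyGet? in_ 0).getD 0) ((PySem.List.pyGet? in_ 1).getD 0) v cd (PySem.List.dedup cd) (List.replicate cd.length none)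
    rw [h1, List.getElem?_eq_none]
    rw [h2]
    simpa using Nat.le_of_not_lt hj
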